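-- pv_equiv track=rewrite | github.com/achimdehnert/platform | apps/bfagent/apps/writing_hub/services/ai_import_service.py | _detect_structure_type
-- ===== SOURCE A (Python) =====
-- from typing import List, Dict, Optional, Any
--
-- def _detect_structure_type(plot_points: List[Dict]) -> str:
--     """Detect story structure type from plot points"""
--     types = [p.get('type', '').lower() for p in plot_points]
--
--     if any('hero' in t or 'journey' in t for t in types):
--         return "Hero's Journey"
--     elif any('three' in t or '3-act' in t for t in types):
--         return "Three-Act Structure"
--     elif any('save' in t and 'cat' in t for t in types):
--         return "Save the Cat"
--     elif len(plot_points) >= 5: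
--         return "Multi-Act Structure"
--     elif len(plot_points) >= 3:
--         return "Three-Act Structure"
--     else:
--         return "Linear"
-- ===== SOURCE B (Python) =====
-- def _detect_structure_type(plot_points):
--     """Rank-based detection: each point gets a numeric rank (hero pattern is
--     maximal and exits immediately); keep the running max rank and translate
--     the final rank to a label, falling back on the point count."""
--     best = 0
--     for p in plot_points:
--         t = p.get('type', '').lower()
--         if 'hero' in t or 'journey' in t:
--             return "Hero's Journey"  # maximal rank: nothing can beat it
--         if 'three' in t or '3-act' in t:
--             best = max(best, 2)
--         elif 'save' in t and 'cat' in t: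
--             best = max(best, 1)
--     if best == 2:
--         return "Three-Act Structure"
--     if best == 1:
--         return "Save the Cat"
--     n = len(plot_points)
--     return "Multi-Act Structure" if n >= 5 else ("Three-Act Structure" if n >= 3 else "Linear")
-- ===== Notes on version B (the rewrite author's own statement) =====
-- stated objective: alternative
-- what changed: Replaces the types-list comprehension plus three staged any() existence scans with a ranked single scan: each point is mapped to a numeric rank, the hero rank short-circuits with an immediate return, the loop keeps only the running max rank, and the answer is read off the final rank.
import Mathlib
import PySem

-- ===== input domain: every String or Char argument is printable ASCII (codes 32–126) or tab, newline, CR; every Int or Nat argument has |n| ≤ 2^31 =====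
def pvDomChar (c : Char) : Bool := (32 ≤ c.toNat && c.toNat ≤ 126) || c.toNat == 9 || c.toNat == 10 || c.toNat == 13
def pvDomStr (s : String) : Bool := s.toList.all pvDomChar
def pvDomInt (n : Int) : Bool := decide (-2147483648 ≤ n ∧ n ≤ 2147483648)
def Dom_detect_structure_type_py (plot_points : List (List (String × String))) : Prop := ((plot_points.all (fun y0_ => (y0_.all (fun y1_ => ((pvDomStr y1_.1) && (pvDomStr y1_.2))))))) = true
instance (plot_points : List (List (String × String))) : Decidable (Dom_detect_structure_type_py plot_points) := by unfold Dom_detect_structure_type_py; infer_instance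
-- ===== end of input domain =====

-- B replaces A's staged any() existence scans by a single ranked scan with an early exit on the hero rank; objective: alternative decomposition, same cost.

-- ===== PORT A =====
-- getType p = p.get('type', '').lower()
def pvGetType (p : List (String × String)) : String :=
  PySem.Str.lower ((PySem.Dict.ofList p).getD "type" "")

-- the three substring tests, shared verbatim by both sources
def pvIsHero (p : List (String × String)) : Bool :=
  let t := pvGetType p
  PySem.Str.isIn "hero" t || PySem.Str.isIn "journey" t
def pvIsThree (p : List (String × String)) : Bool :=
  let t := pvGetType p
  PySem.Str.isIn "three" t || PySem.Str.isIn "3-act" t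
def pvIsCat (p : List (String × String)) : Bool :=
  let t := pvGetType p
  PySem.Str.isIn "save" t && PySem.Str.isIn "cat" t

def detect_structure_type_py (plot_points : List (List (String × String))) : String :=
  let types := plot_points.map pvGetType
  if types.any (fun t => PySem.Str.isIn "hero" t || PySem.Str.isIn "journey" t) then "Hero's Journey"
  else if types.any (fun t => PySem.Str.isIn "three" t || PySem.Str.isIn "3-act" t) then "Three-Act Structure"
  else if types.any (fun t => PySem.Str.isIn "save" t && PySem.Str.isIn "cat" t) then "Save the Cat"
  else if plot_points.length ≥ 5 then "Multi-Act Structure"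
  else if plot_points.length ≥ 3 then "Three-Act Structure"
  else "Linear"

-- ===== PORT B =====
-- The loop of Source B: 'none' encodes the early 'return "Hero's Journey"', 'some best' the loop falling through.
def pvLoop : List (List (String × String)) → Int → Option Int
  | [], best => some best
  | p :: tl, best =>
    if pvIsHero p then none
    else if pvIsThree p then pvLoop tl (max best 2)
    else if pvIsCat p then pvLoop tl (max best 1)
    else pvLoop tl best

def detect_structure_type_py_alt (plot_points : List (List (String × String))) : String :=
  match pvLoop plot_points 0 with
  | none => "Hero's Journey"
  | some best =>
    if best = 2 then "Three-Act Structure"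
    else if best = 1 then "Save the Cat"
    else
      let n : Int := plot_points.length
      if n ≥ 5 then "Multi-Act Structure"
      else if n ≥ 3 then "Three-Act Structure"
      else "Linear"

-- ===== PRECONDITION & SPEC =====
def Spec_detect_structure_type_py (plot_points : List (List (String × String))) (out : String) : Prop := out = detect_structure_type_py_alt plot_points
instance (plot_points : List (List (String × String))) (out : String) : Decidable (Spec_detect_structure_type_py plot_points out) := by unfold Spec_detect_structure_type_py; infer_instance

-- ===== CLAIM (what is proved, stated in full; the proofs are below) =====
def Claim_equal_detect_structure_type_py : Prop := ∀ (plot_points : List (List (String × String))), Dom_detect_structure_type_py plot_points → Spec_detect_structure_type_py plot_points (detect_structure_type_py plot_points)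

-- ===== LEMMAS AND PROOFS =====
def pvRank (l : List (List (String × String))) : Int :=
  if l.any pvIsThree then 2 else if l.any pvIsCat then 1 else 0

theorem pvRank_nonneg (l : List (List (String × String))) : 0 ≤ pvRank l := by
  unfold pvRank; split_ifs <;> omega

theorem pvRank_le_two (l : List (List (String × String))) : pvRank l ≤ 2 := by
  unfold pvRank; split_ifs <;> omega

theorem pvRank_cons_three (p : List (String × String)) (tl : List (List (String × String)))
    (h : pvIsThree p = true) : pvRank (p :: tl) = 2 := by
  unfold pvRank; simp [h]

theorem pvRank_cons_cat (p : List (String × String)) (tl : List (List (String × String)))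
    (h2 : pvIsThree p = false) (h3 : pvIsCat p = true) :
    pvRank (p :: tl) = max 1 (pvRank tl) := by
  unfold pvRank; simp only [List.any_cons, h2, h3, Bool.false_or, Bool.true_or]
  split_ifs <;> omega

theorem pvRank_cons_none (p : List (String × String)) (tl : List (List (String × String)))
    (h2 : pvIsThree p = false) (h3 : pvIsCat p = false) : pvRank (p :: tl) = pvRank tl := by
  unfold pvRank; simp [h2, h3]

theorem pvLoop_char (l : List (List (String × String))) (best : Int) (hb : 0 ≤ best) :
    pvLoop l best = if l.any pvIsHero then none else some (max best (pvRank l)) := by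
  induction l generalizing best with
  | nil => simp only [pvLoop, List.any_nil, Bool.false_eq_true, if_false, pvRank, List.any_nil,
      Option.some.injEq]; omega
  | cons p tl ih =>
    simp only [pvLoop, List.any_cons]
    by_cases h1 : pvIsHero p = true
    · simp [h1]
    · rw [Bool.not_eq_true] at h1
      simp only [h1, Bool.false_or, Bool.false_eq_true, if_false]
      by_cases h2 : pvIsThree p = true
      · simp only [h2, ih (max best 2) (by omega), pvRank_cons_three p tl h2]
        by_cases hH : tl.any pvIsHero = true
        · simp [hH]
        · rw [Bool.not_eq_true] at hH
          simp only [hH, Bool.false_eq_true, if_false]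
          exact congrArg some (by have := pvRank_le_two tl; have := pvRank_nonneg tl; omega)
      · rw [Bool.not_eq_true] at h2
        simp only [h2, Bool.false_eq_true, if_false]
        by_cases h3 : pvIsCat p = true
        · simp only [h3, ih (max best 1) (by omega), pvRank_cons_cat p tl h2 h3]
          by_cases hH : tl.any pvIsHero = true
          · simp [hH]
          · rw [Bool.not_eq_true] at hH
            simp only [hH, Bool.false_eq_true, if_false]
            exact congrArg some (by have := pvRank_le_two tl; have := pvRank_nonneg tl; omega)
        · rw [Bool.not_eq_true] at h3
          simp only [h3, Bool.false_eq_true, if_false, ih best hb, pvRank_cons_none p tl h2 h3]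

theorem pvAny_hero (l : List (List (String × String))) :
    (l.map pvGetType).any (fun t => PySem.Str.isIn "hero" t || PySem.Str.isIn "journey" t)
      = l.any pvIsHero := by
  rw [List.any_map]; rfl

theorem pvAny_three (l : List (List (String × String))) :
    (l.map pvGetType).any (fun t => PySem.Str.isIn "three" t || PySem.Str.isIn "3-act" t)
      = l.any pvIsThree := by
  rw [List.any_map]; rfl

theorem pvAny_cat (l : List (List (String × String))) :
    (l.map pvGetType).any (fun t => PySem.Str.isIn "save" t && PySem.Str.isIn "cat" t)
      = l.any pvIsCat := by
  rw [List.any_map]; rfl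

-- ===== VERDICT (by name: the statement is the Claim_ definition above) =====
theorem detect_structure_type_py_spec : Claim_equal_detect_structure_type_py := by
  intro pp _
  unfold Spec_detect_structure_type_py detect_structure_type_py detect_structure_type_py_alt
  rw [pvLoop_char pp 0 le_rfl]
  simp only [pvAny_hero, pvAny_three, pvAny_cat]
  by_cases hH : pp.any pvIsHero = true
  · simp [hH]
  · rw [Bool.not_eq_true] at hH
    simp only [hH, Bool.false_eq_true, if_false]
    unfold pvRank
    by_cases hT : pp.any pvIsThree = true
    · simp only [hT]
      norm_num
    · rw [Bool.not_eq_true] at hT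
      simp only [hT, Bool.false_eq_true, if_false]
      by_cases hC : pp.any pvIsCat = true
      · simp only [hC]
        norm_num
      · rw [Bool.not_eq_true] at hC
        simp only [hC, Bool.false_eq_true, if_false, max_self]
        norm_num
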